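-- pv_equiv track=rewrite | github.com/sueszli/vector-database-benchmark | dataset/python-mutated/updateHostsFile.py | sort_sources
-- ===== SOURCE A (Python) =====
-- def sort_sources(sources):
--     if False:
--         while True:
--             i = 10
--     "\n    Sorts the sources.\n    The idea is that all Steven Black's list, file or entries\n    get on top and the rest sorted alphabetically.\n\n    Parameters\n    ----------\n    sources: list\n        The sources to sort.\n    "
--     result = sorted(sources.copy(), key=lambda x: x.lower().replace('-', '').replace('_', '').replace(' ', ''))
--     steven_black_positions = [x for (x, y) in enumerate(result) if 'stevenblack' in y.lower()]
--     for index in steven_black_positions: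
--         result.insert(0, result.pop(index))
--     return result
-- ===== SOURCE B (Python) =====
-- def sort_sources(sources):
--     result = sorted(sources, key=lambda x: x.lower().replace('-', '').replace('_', '').replace(' ', ''))
--     steven = [x for x in result if 'stevenblack' in x.lower()]
--     others = [x for x in result if 'stevenblack' not in x.lower()]
--     return steven[::-1] + others
-- ===== Notes on version B (the rewrite author's own statement) =====
-- stated objective: simpler
-- what changed: Replaced A's precomputed-index loop of insert(0, pop(index)) mutations by partitioning the sorted list into stevenblack/non-stevenblack with two filters and returning the stevenblack part reversed in front of the rest.
import Mathlib
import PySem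

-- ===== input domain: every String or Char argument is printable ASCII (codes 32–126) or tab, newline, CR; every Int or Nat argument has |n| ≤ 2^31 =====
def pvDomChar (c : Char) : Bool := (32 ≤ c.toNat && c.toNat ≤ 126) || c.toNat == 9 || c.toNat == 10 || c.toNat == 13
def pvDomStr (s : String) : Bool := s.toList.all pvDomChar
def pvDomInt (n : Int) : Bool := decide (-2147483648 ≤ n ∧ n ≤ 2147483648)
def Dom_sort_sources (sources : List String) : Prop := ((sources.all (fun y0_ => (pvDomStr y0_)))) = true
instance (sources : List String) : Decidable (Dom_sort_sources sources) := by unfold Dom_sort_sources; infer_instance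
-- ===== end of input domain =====

-- B replaces A's insert(0, pop(index)) mutation loop over precomputed indices by two filters
-- of the sorted list plus one reversal (objective: simpler decomposition; same return value).

-- ===== PORT A =====
-- shared by both ports: both Pythons use the identical sort key and membership test
def pvKey (x : String) : String :=
  PySem.Str.replace (PySem.Str.replace (PySem.Str.replace (PySem.Str.lower x) "-" "") "_" "") " " ""

def pvIsSB (y : String) : Bool := PySem.Str.isIn "stevenblack" (PySem.Str.lower y)

-- one iteration of A's loop body: result.insert(0, result.pop(index)); the `none` branch is
-- unreachable (Python would raise IndexError; A's indices are always in range)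
def pvStep (l : List String) (index : Int) : List String :=
  match PySem.List.pop? l index with
  | some (x, rest) => PySem.List.insert rest 0 x
  | none => l

def sort_sources (sources : List String) : List String :=
  let result := PySem.List.sorted sources pvKey false
  let steven_black_positions :=
    ((PySem.List.enumerate result 0).filter (fun p => pvIsSB p.2)).map (·.1)
  steven_black_positions.foldl pvStep result

-- ===== PORT B =====
def sort_sources_alt (sources : List String) : List String :=
  let result := PySem.List.sorted sources pvKey false
  let steven := result.filter (fun x => pvIsSB x)
  let others := result.filter (fun x => !pvIsSB x)
  steven.reverse ++ others   -- steven[::-1] + others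

-- ===== PRECONDITION & SPEC =====
def Spec_sort_sources (sources : List String) (out : List String) : Prop := out = sort_sources_alt sources
instance (sources : List String) (out : List String) : Decidable (Spec_sort_sources sources out) := by unfold Spec_sort_sources; infer_instance

-- ===== CLAIM (what is proved, stated in full; the proofs are below) =====
def Claim_equal_sort_sources : Prop := ∀ (sources : List String), Dom_sort_sources sources → Spec_sort_sources sources (sort_sources sources)

-- ===== LEMMAS AND PROOFS =====

-- popping at the length of the prefix extracts the element right after it
theorem pvPop_at_prefix (pre b' : List String) (x : String) :
    PySem.List.pop? (pre ++ x :: b') ((pre.length : Nat) : Int) = some (x, pre ++ b') := by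
  rw [PySem.List.pop?_natCast (pre ++ x :: b') pre.length (by simp)]
  rw [List.eraseIdx_append_of_length_le (le_refl _)]
  simp

-- loop invariant for A's for-loop: with `acc` the already-moved stevenblack elements (front of
-- the list, newest first), `a` the non-stevenblack elements already passed over, and `b` the
-- untouched suffix, running the remaining loop iterations yields filters of b around acc ++ a.
theorem pvLoop_inv (b : List String) : ∀ (acc a : List String), (∀ x ∈ a, pvIsSB x = false) →
    (((PySem.List.enumerate b ((acc.length + a.length : Nat) : Int)).filter
        (fun p => pvIsSB p.2)).map (·.1)).foldl pvStep (acc ++ a ++ b)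
      = (b.filter (fun x => pvIsSB x)).reverse ++ acc ++ a ++ b.filter (fun x => !pvIsSB x) := by
  induction b with
  | nil => intro acc a _; simp [PySem.List.enumerate_nil]
  | cons x b' ih =>
    intro acc a ha
    rw [PySem.List.enumerate_cons]
    by_cases hx : pvIsSB x = true
    · -- stevenblack head: one loop step moves x to the front
      have hstep : pvStep (acc ++ a ++ (x :: b')) ((acc.length + a.length : Nat) : Int)
          = (x :: acc) ++ a ++ b' := by
        have h := pvPop_at_prefix (acc ++ a) b' x
        rw [List.length_append] at h
        push_cast at h
        simp only [List.append_assoc] at h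
        simp [pvStep, List.append_assoc, h, PySem.List.insert_zero]
      have hcast : ((acc.length + a.length : Nat) : Int) + 1
          = (((x :: acc).length + a.length : Nat) : Int) := by push_cast; simp; omega
      simp only [List.filter_cons, hx, if_pos, List.map_cons, List.foldl_cons, hstep, hcast]
      rw [ih (x :: acc) a ha]
      simp [List.append_assoc]
    · -- non-stevenblack head: no loop iteration touches it
      have hx' : pvIsSB x = false := by simpa using hx
      have hcast : ((acc.length + a.length : Nat) : Int) + 1
          = ((acc.length + (a ++ [x]).length : Nat) : Int) := by push_cast; simp; omega
      have ha' : ∀ y ∈ a ++ [x], pvIsSB y = false := by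
        intro y hy; rcases List.mem_append.1 hy with h | h
        · exact ha y h
        · simp at h; simpa [h] using hx'
      simp only [List.filter_cons, hx', Bool.false_eq_true, hcast]
      have := ih acc (a ++ [x]) ha'
      simp only [List.append_assoc] at this ⊢
      simpa [hx', List.append_assoc] using this

-- ===== VERDICT (by name: the statement is the Claim_ definition above) =====
theorem sort_sources_spec : Claim_equal_sort_sources := by
  intro sources _
  show sort_sources sources = sort_sources_alt sources
  unfold sort_sources sort_sources_alt
  have := pvLoop_inv (PySem.List.sorted sources pvKey false) [] [] (by simp)
  simpa using this
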